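-- pv_equiv track=rewrite | github.com/Pitonero/musdocemas | app.py | son_parejas_contrarias
-- ===== SOURCE A (Python) =====
-- def son_parejas_contrarias(pares_confirmados):
--     """
--     Determina si los jugadores con pares están en parejas contrarias.
--
--     pares_confirmados: dict con el formato {nombre_jugador: True/False}
--     """
--     # Convertir las claves a una lista para mantener el orden
--     posiciones = list(pares_confirmados.keys())
--
--     # Verificar que haya exactamente 4 jugadores
--     if len(posiciones) != 4:
--         raise ValueError("pares_confirmados debe contener exactamente 4 jugadores.")
--
--     # Determinar las parejas dinámicamente
--     pareja1 = {posiciones[0], posiciones[2]}  # Jugador en posición 0 y 2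
--     pareja2 = {posiciones[1], posiciones[3]}  # Jugador en posición 1 y 3
--
--     # Jugadores que tienen pares
--     jugadores_con_pares = [jugador for jugador, tiene_pares in pares_confirmados.items() if tiene_pares]
--
--     # Comprobación de cantidad
--     if len(jugadores_con_pares) != 2:
--         return False  # No aplica si no hay exactamente dos jugadores con pares
--
--     # Determinar si están en la misma pareja
--     jugador1, jugador2 = jugadores_con_pares
--     if (jugador1 in pareja1 and jugador2 in pareja1) or (jugador1 in pareja2 and jugador2 in pareja2):
--         return False  # Misma pareja
--
--     # Si no están en la misma pareja, son parejas contrarias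
--     return True
-- ===== SOURCE B (Python) =====
-- def son_parejas_contrarias(pares_confirmados):
--     if len(pares_confirmados) != 4:
--         raise ValueError("pares_confirmados debe contener exactamente 4 jugadores.")
--     idxs = [i for i, v in enumerate(pares_confirmados.values()) if v]
--     return len(idxs) == 2 and (idxs[0] + idxs[1]) % 2 == 1
-- ===== Notes on version B (the rewrite author's own statement) =====
-- stated objective: simpler
-- what changed: B drops the name sets entirely: it collects the indices of True values and returns whether exactly two exist and their sum is odd (opposite parity = opposite teams), instead of building two name sets and testing set membership of the two True players.
import Mathlib
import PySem

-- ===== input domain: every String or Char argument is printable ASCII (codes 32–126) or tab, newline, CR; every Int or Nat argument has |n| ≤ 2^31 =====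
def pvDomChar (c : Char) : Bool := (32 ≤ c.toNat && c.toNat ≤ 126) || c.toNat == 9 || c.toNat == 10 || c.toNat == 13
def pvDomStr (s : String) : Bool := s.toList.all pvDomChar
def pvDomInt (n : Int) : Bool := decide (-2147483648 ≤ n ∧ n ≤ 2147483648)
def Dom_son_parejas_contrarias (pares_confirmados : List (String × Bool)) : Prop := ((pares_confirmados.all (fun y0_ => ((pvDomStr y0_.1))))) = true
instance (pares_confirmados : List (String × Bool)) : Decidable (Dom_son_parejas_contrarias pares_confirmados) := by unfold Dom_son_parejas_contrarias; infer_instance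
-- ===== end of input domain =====

-- B replaces A's two name sets and membership tests by index parity: collect the indices of
-- True entries and return whether exactly two exist and their sum is odd (objective: simpler).


-- ===== PORT A =====
def son_parejas_contrarias (pares_confirmados : List (String × Bool)) : Bool :=
  let posiciones := pares_confirmados.map Prod.fst
  match posiciones with
  | [p0, p1, p2, p3] =>
    let pareja1 : PySem.Set String := PySem.Set.ofList [p0, p2]
    let pareja2 : PySem.Set String := PySem.Set.ofList [p1, p3]
    let jugadores_con_pares := (pares_confirmados.filter (fun x => x.2)).map Prod.fst
    if jugadores_con_pares.length ≠ 2 then false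
    else
      match jugadores_con_pares with
      | [jugador1, jugador2] =>
        if (PySem.Set.contains pareja1 jugador1 && PySem.Set.contains pareja1 jugador2)
           || (PySem.Set.contains pareja2 jugador1 && PySem.Set.contains pareja2 jugador2) then false
        else true
      | _ => false
  | _ => false  -- Python raises ValueError here (len != 4); excluded by Pre_

-- ===== PORT B =====
def son_parejas_contrarias_alt (pares_confirmados : List (String × Bool)) : Bool :=
  if pares_confirmados.length ≠ 4 then false  -- Python raises ValueError here; excluded by Pre_
  else
    let idxs := ((PySem.List.enumerate (pares_confirmados.map Prod.snd)).filter (fun p => p.2)).map Prod.fst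
    idxs.length == 2 && PySem.Int.mod (PySem.List.pyGetD idxs 0 0 + PySem.List.pyGetD idxs 1 0) 2 == 1

-- ===== PRECONDITION & SPEC =====
-- Pre_ excludes exactly the inputs where the Python A raises ValueError (length ≠ 4); the
-- Nodup condition says the keys are distinct, which every real Python dict satisfies.
def Pre_son_parejas_contrarias (pares_confirmados : List (String × Bool)) : Prop :=
  pares_confirmados.length = 4 ∧ (pares_confirmados.map Prod.fst).Nodup
instance (pares_confirmados : List (String × Bool)) : Decidable (Pre_son_parejas_contrarias pares_confirmados) := by unfold Pre_son_parejas_contrarias; infer_instance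
def pvWitness_son_parejas_contrarias : (List (String × Bool)) := [("a", true), ("b", false), ("c", false), ("d", true)]
def Spec_son_parejas_contrarias (pares_confirmados : List (String × Bool)) (out : Bool) : Prop := out = son_parejas_contrarias_alt pares_confirmados
instance (pares_confirmados : List (String × Bool)) (out : Bool) : Decidable (Spec_son_parejas_contrarias pares_confirmados out) := by unfold Spec_son_parejas_contrarias; infer_instance

-- ===== CLAIM (what is proved, stated in full; the proofs are below) =====
def Claim_equal_son_parejas_contrarias : Prop := ∀ (pares_confirmados : List (String × Bool)), Dom_son_parejas_contrarias pares_confirmados → Pre_son_parejas_contrarias pares_confirmados → Spec_son_parejas_contrarias pares_confirmados (son_parejas_contrarias pares_confirmados)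

-- ===== LEMMAS AND PROOFS =====
theorem son_parejas_contrarias_four (k0 k1 k2 k3 : String) (b0 b1 b2 b3 : Bool)
    (h01 : k0 ≠ k1) (h02 : k0 ≠ k2) (h03 : k0 ≠ k3) (h12 : k1 ≠ k2) (h13 : k1 ≠ k3) (h23 : k2 ≠ k3) :
    son_parejas_contrarias [(k0, b0), (k1, b1), (k2, b2), (k3, b3)]
      = son_parejas_contrarias_alt [(k0, b0), (k1, b1), (k2, b2), (k3, b3)] := by
  cases b0 <;> cases b1 <;> cases b2 <;> cases b3 <;>
    simp [son_parejas_contrarias, son_parejas_contrarias_alt, PySem.Set.contains,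
      PySem.Set.ofList, PySem.Set.add, PySem.List.enumerate, PySem.Int.mod, PySem.List.pyGetD, PySem.List.pyIdx?, h01, h02, h03, h12, h13, h23,
      h01.symm, h02.symm, h03.symm, h12.symm, h13.symm, h23.symm]

-- ===== VERDICT (by name: the statement is the Claim_ definition above) =====
theorem son_parejas_contrarias_spec : Claim_equal_son_parejas_contrarias := by
  intro ps _ hpre
  obtain ⟨hlen, hnd⟩ := hpre
  match ps, hlen with
  | [(k0, b0), (k1, b1), (k2, b2), (k3, b3)], _ =>
    simp only [List.map, List.nodup_cons, List.mem_cons, List.not_mem_nil,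
      List.nodup_nil, or_false, not_or] at hnd
    exact son_parejas_contrarias_four k0 k1 k2 k3 b0 b1 b2 b3
      hnd.1.1 hnd.1.2.1 hnd.1.2.2 hnd.2.1.1 hnd.2.1.2 hnd.2.2.1
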